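-- pv_equiv track=rewrite | github.com/GregoryMorse/dyngraph | virt.py | get_consec_ones
-- ===== SOURCE A (Python) =====
-- def get_consec_ones(num):
--   i = 0
--   pos = []
--   while num != 0:
--     while (num & 1) == 0: i+=1; num >>= 1
--     j = 0
--     while (num & 1) == 1: i+=1; j+=1; num >>= 1
--     if j == 1: pos.append(i)
--     else: pos.append(j-i-1); pos.append(i+1)
--   return tuple(pos)
-- ===== SOURCE B (Python) =====
-- def get_consec_ones(num):
--   # Phase 1: extract LSB-first bit list; Phase 2: group maximal runs of ones
--   # as (start, length) pairs; Phase 3: encode each run.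
--   bits = []
--   while num != 0:
--     bits.append(num & 1)
--     num >>= 1
--   runs = []
--   start = None
--   for idx, b in enumerate(bits):
--     if start is None:
--       if b:
--         start = idx
--     elif not b:
--       runs.append((start, idx - start))
--       start = None
--   if start is not None:
--     runs.append((start, len(bits) - start))
--   pos = []
--   for st, ln in runs:
--     if ln == 1:
--       pos.append(st + 1)
--     else:
--       pos.append(-st - 1)
--       pos.append(st + ln + 1)
--   return tuple(pos)
-- ===== Notes on version B (the rewrite author's own statement) =====
-- stated objective: simpler
-- what changed: B replaces A's single interleaved shift-and-count while-loop (nested zero-skipping and one-counting loops mutating num, i, j) by three separate phases: extract the LSB-first bit list, group maximal runs of ones as (start,length) pairs in one scan, then encode each run arithmetically (start+1 for length 1, else -start-1 and start+length+1).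
import Mathlib
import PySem

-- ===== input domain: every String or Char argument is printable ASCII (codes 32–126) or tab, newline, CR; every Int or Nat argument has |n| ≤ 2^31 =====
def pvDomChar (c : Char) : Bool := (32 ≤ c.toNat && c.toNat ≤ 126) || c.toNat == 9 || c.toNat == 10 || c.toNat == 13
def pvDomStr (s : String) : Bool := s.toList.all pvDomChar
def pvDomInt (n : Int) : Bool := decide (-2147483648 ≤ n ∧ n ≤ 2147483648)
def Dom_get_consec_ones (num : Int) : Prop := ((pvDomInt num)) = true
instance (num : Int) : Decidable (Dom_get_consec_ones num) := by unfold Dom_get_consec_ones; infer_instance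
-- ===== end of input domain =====

-- B re-implements the run encoder in three separate phases (bit list, run grouping, encoding)
-- instead of A's single interleaved shift-and-count loop; objective: simpler/alternative, same cost.
-- Every Python `while` is ported with a structural fuel counter that only totalizes the
-- recursion; the fuel budgets below are proved ample for every num ≥ 0 (see the bridge lemmas).

-- ===== PORT A =====
-- inner loop `while (num & 1) == 0: i+=1; num >>= 1`
def pvSkipZeros : Nat → Int → Int → Int × Int
  | 0, num, i => (num, i)
  | f + 1, num, i =>
      if PySem.Int.band num 1 = 0 then pvSkipZeros f (num >>> (1:Nat)) (i + 1) else (num, i)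

-- inner loop `while (num & 1) == 1: i+=1; j+=1; num >>= 1`
def pvTakeOnes : Nat → Int → Int → Int → Int × Int × Int
  | 0, num, i, j => (num, i, j)
  | f + 1, num, i, j =>
      if PySem.Int.band num 1 = 1 then pvTakeOnes f (num >>> (1:Nat)) (i + 1) (j + 1)
      else (num, i, j)

-- outer loop `while num != 0`; `pos` is the accumulator list
def pvOuterA : Nat → Int → Int → List Int → List Int
  | 0, _, _, pos => pos
  | f + 1, num, i, pos =>
      if num = 0 then pos
      else
        let p := pvSkipZeros (num.toNat + 1) num i
        let t := pvTakeOnes (p.1.toNat + 1) p.1 p.2 0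
        pvOuterA f t.1 t.2.1
          (if t.2.2 = 1 then pos ++ [t.2.1] else pos ++ [t.2.2 - t.2.1 - 1, t.2.1 + 1])

def get_consec_ones (num : Int) : List Int := pvOuterA (num.toNat + 1) num 0 []

-- ===== PORT B =====
-- phase 1: LSB-first bit list (`while num != 0: bits.append(num & 1); num >>= 1`)
def pvBitsB : Nat → Int → List Int
  | 0, _ => []
  | f + 1, num =>
      if num = 0 then [] else PySem.Int.band num 1 :: pvBitsB f (num >>> (1:Nat))

-- phase 2: group maximal runs of ones as (start, length); `idx` is the current index,
-- `st` the pending run start (Source B's `start` variable, None ↦ none)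
def pvRuns : List Int → Int → Option Int → List (Int × Int)
  | [], _, none => []
  | [], idx, some st => [(st, idx - st)]
  | b :: rest, idx, none =>
      if b ≠ 0 then pvRuns rest (idx + 1) (some idx) else pvRuns rest (idx + 1) none
  | b :: rest, idx, some st =>
      if b = 0 then (st, idx - st) :: pvRuns rest (idx + 1) none
      else pvRuns rest (idx + 1) (some st)

-- phase 3: encode each run
def pvEnc (runs : List (Int × Int)) : List Int :=
  runs.flatMap (fun r => if r.2 = 1 then [r.1 + 1] else [-r.1 - 1, r.1 + r.2 + 1])

def get_consec_ones_alt (num : Int) : List Int :=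
  pvEnc (pvRuns (pvBitsB (num.toNat + 1) num) 0 none)

-- ===== PRECONDITION & SPEC =====
-- Pre_ excludes exactly the negative inputs, on which Python A never returns
-- (its `while` loops diverge: `num >>= 1` never reaches 0 from a negative num).
def Pre_get_consec_ones (num : Int) : Prop := 0 ≤ num
instance (num : Int) : Decidable (Pre_get_consec_ones num) := by
  unfold Pre_get_consec_ones; infer_instance

def pvWitness_get_consec_ones : Int := (93)

def Spec_get_consec_ones (num : Int) (out : List Int) : Prop := out = get_consec_ones_alt num
instance (num : Int) (out : List Int) : Decidable (Spec_get_consec_ones num out) := by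
  unfold Spec_get_consec_ones; infer_instance

-- ===== CLAIM (what is proved, stated in full; the proofs are below) =====
def Claim_equal_get_consec_ones : Prop := ∀ (num : Int), Dom_get_consec_ones num → Pre_get_consec_ones num → Spec_get_consec_ones num (get_consec_ones num)

-- ===== LEMMAS AND PROOFS =====

theorem pvShiftr1 (n : Int) : n >>> (1:Nat) = n / 2 := by
  simpa using Int.shiftRight_eq_div_pow n 1

theorem pvBand1 (n : Int) : PySem.Int.band n 1 = n % 2 := by
  rw [PySem.Int.band_one]; exact PySem.Int.mod_eq_emod_of_pos (by omega)

-- fuel-free reference versions of the three loops (well-founded recursion); the ports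
-- are proved equal to them whenever the fuel budget suffices, and the main induction
-- is carried out on these.
theorem pvDecEven (num : Int) (h : num % 2 = 0 ∧ num ≠ 0) :
    (num >>> (1:Nat)).natAbs < num.natAbs := by rw [pvShiftr1]; omega

theorem pvDecOdd (num : Int) (h : num % 2 = 1 ∧ num ≠ -1) :
    (num >>> (1:Nat)).natAbs < num.natAbs := by rw [pvShiftr1]; omega

def pvSkipZerosW (num i : Int) : Int × Int :=
  if h : num % 2 = 0 ∧ num ≠ 0 then pvSkipZerosW (num >>> (1:Nat)) (i + 1) else (num, i)
  termination_by num.natAbs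
  decreasing_by exact pvDecEven num h

def pvTakeOnesW (num i j : Int) : Int × Int × Int :=
  if h : num % 2 = 1 ∧ num ≠ -1 then pvTakeOnesW (num >>> (1:Nat)) (i + 1) (j + 1)
  else (num, i, j)
  termination_by num.natAbs
  decreasing_by exact pvDecOdd num h

theorem pvSkipZerosW_even (num i : Int) (h0 : num ≠ 0) (he : num % 2 = 0) :
    pvSkipZerosW num i = pvSkipZerosW (num / 2) (i + 1) := by
  rw [pvSkipZerosW, dif_pos ⟨he, h0⟩, pvShiftr1]

theorem pvSkipZerosW_odd (num i : Int) (ho : num % 2 = 1) :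
    pvSkipZerosW num i = (num, i) := by
  rw [pvSkipZerosW, dif_neg (by omega)]

theorem pvTakeOnesW_odd (num i j : Int) (ho : num % 2 = 1) (hne : num ≠ -1) :
    pvTakeOnesW num i j = pvTakeOnesW (num / 2) (i + 1) (j + 1) := by
  rw [pvTakeOnesW, dif_pos ⟨ho, hne⟩, pvShiftr1]

theorem pvTakeOnesW_even (num i j : Int) (he : num % 2 = 0) :
    pvTakeOnesW num i j = (num, i, j) := by
  rw [pvTakeOnesW, dif_neg (by omega)]

theorem pvSkipZerosW_spec (num i : Int) (h : 0 < num) :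
    0 < (pvSkipZerosW num i).1 ∧ (pvSkipZerosW num i).1 ≤ num ∧ (pvSkipZerosW num i).1 % 2 = 1 := by
  induction num, i using pvSkipZerosW.induct with
  | case1 num i h' ih =>
    rw [pvSkipZerosW, dif_pos h']
    have := ih (by rw [pvShiftr1]; omega)
    rw [pvShiftr1] at this ⊢
    omega
  | case2 num i h' =>
    rw [pvSkipZerosW, dif_neg h']
    refine ⟨h, le_refl _, ?_⟩
    omega

theorem pvTakeOnesW_spec (num i j : Int) (h0 : 0 ≤ num) :
    (pvTakeOnesW num i j).1 ≤ num ∧ 0 ≤ (pvTakeOnesW num i j).1 ∧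
      (num % 2 = 1 → (pvTakeOnesW num i j).1 < num) := by
  induction num, i, j using pvTakeOnesW.induct with
  | case1 num i j h' ih =>
    rw [pvTakeOnesW, dif_pos h']
    have := ih (by rw [pvShiftr1]; omega)
    rw [pvShiftr1] at this ⊢
    omega
  | case2 num i j h' =>
    rw [pvTakeOnesW, dif_neg h']
    exact ⟨le_refl _, h0, fun hm => by omega⟩

theorem pvDecOuter (num i : Int) (h : 0 < num) :
    ((pvTakeOnesW (pvSkipZerosW num i).1 (pvSkipZerosW num i).2 0).1).toNat < num.toNat := by
  have hp := pvSkipZerosW_spec num i h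
  have ht := pvTakeOnesW_spec (pvSkipZerosW num i).1 (pvSkipZerosW num i).2 0 (by omega)
  have := ht.2.2 hp.2.2
  omega

def pvOuterAW (num i : Int) (pos : List Int) : List Int :=
  if h : 0 < num then
    let p := pvSkipZerosW num i
    let t := pvTakeOnesW p.1 p.2 0
    pvOuterAW t.1 t.2.1
      (if t.2.2 = 1 then pos ++ [t.2.1] else pos ++ [t.2.2 - t.2.1 - 1, t.2.1 + 1])
  else pos
  termination_by num.toNat
  decreasing_by exact pvDecOuter num i h

theorem pvOuterAW_stop (num i : Int) (pos : List Int) (h : ¬ 0 < num) :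
    pvOuterAW num i pos = pos := by
  rw [pvOuterAW, dif_neg h]

theorem pvOuterAW_pos (num i : Int) (pos : List Int) (h : 0 < num) :
    pvOuterAW num i pos =
      pvOuterAW (pvTakeOnesW (pvSkipZerosW num i).1 (pvSkipZerosW num i).2 0).1
        (pvTakeOnesW (pvSkipZerosW num i).1 (pvSkipZerosW num i).2 0).2.1
        (if (pvTakeOnesW (pvSkipZerosW num i).1 (pvSkipZerosW num i).2 0).2.2 = 1
         then pos ++ [(pvTakeOnesW (pvSkipZerosW num i).1 (pvSkipZerosW num i).2 0).2.1]
         else pos ++ [(pvTakeOnesW (pvSkipZerosW num i).1 (pvSkipZerosW num i).2 0).2.2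
                        - (pvTakeOnesW (pvSkipZerosW num i).1 (pvSkipZerosW num i).2 0).2.1 - 1,
                      (pvTakeOnesW (pvSkipZerosW num i).1 (pvSkipZerosW num i).2 0).2.1 + 1]) := by
  rw [pvOuterAW, dif_pos h]

def pvBitsBW (num : Int) : List Int :=
  if _h : 0 < num then (num % 2) :: pvBitsBW (num >>> (1:Nat)) else []
  termination_by num.toNat
  decreasing_by rw [pvShiftr1]; omega

theorem pvBitsBW_zero : pvBitsBW 0 = [] := by rw [pvBitsBW]; simp

theorem pvBitsBW_pos (num : Int) (h : 0 < num) :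
    pvBitsBW num = num % 2 :: pvBitsBW (num / 2) := by
  rw [pvBitsBW, dif_pos h, pvShiftr1]

-- bridges: each fueled port equals its reference version once the fuel exceeds the value
theorem pvSkipZeros_fuel (f : Nat) : ∀ num i : Int, 0 < num → num.toNat < f →
    pvSkipZeros f num i = pvSkipZerosW num i := by
  induction f with
  | zero => intro num i h hf; omega
  | succ f ih =>
    intro num i h hf
    by_cases hpar : num % 2 = 0
    · rw [pvSkipZeros, if_pos (by rw [pvBand1]; exact hpar), pvShiftr1,
        ih (num / 2) (i + 1) (by omega) (by omega), pvSkipZerosW_even num i (by omega) hpar]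
    · rw [pvSkipZeros, if_neg (by rw [pvBand1]; exact hpar),
        pvSkipZerosW_odd num i (by omega)]

theorem pvTakeOnes_fuel (f : Nat) : ∀ num i j : Int, 0 ≤ num → num.toNat < f →
    pvTakeOnes f num i j = pvTakeOnesW num i j := by
  induction f with
  | zero => intro num i j h hf; omega
  | succ f ih =>
    intro num i j h hf
    by_cases hpar : num % 2 = 1
    · rw [pvTakeOnes, if_pos (by rw [pvBand1]; exact hpar), pvShiftr1,
        ih (num / 2) (i + 1) (j + 1) (by omega) (by omega),
        pvTakeOnesW_odd num i j hpar (by omega)]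
    · rw [pvTakeOnes, if_neg (by rw [pvBand1]; omega),
        pvTakeOnesW_even num i j (by omega)]

theorem pvOuterA_fuel (f : Nat) : ∀ (num i : Int) (pos : List Int), 0 ≤ num → num.toNat < f →
    pvOuterA f num i pos = pvOuterAW num i pos := by
  induction f with
  | zero => intro num i pos h hf; omega
  | succ f ih =>
    intro num i pos h hf
    by_cases hz : num = 0
    · rw [pvOuterA, if_pos hz, hz, pvOuterAW_stop _ _ _ (by omega)]
    · have hpos : 0 < num := by omega
      rw [pvOuterA, if_neg hz]
      simp only
      rw [pvSkipZeros_fuel (num.toNat + 1) num i hpos (by omega)]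
      have hp := pvSkipZerosW_spec num i hpos
      rw [pvTakeOnes_fuel ((pvSkipZerosW num i).1.toNat + 1) (pvSkipZerosW num i).1
        (pvSkipZerosW num i).2 0 (by omega) (by omega)]
      have ht := pvTakeOnesW_spec (pvSkipZerosW num i).1 (pvSkipZerosW num i).2 0 (by omega)
      have hlt := ht.2.2 hp.2.2
      rw [ih _ _ _ (by omega) (by omega), ← pvOuterAW_pos num i pos hpos]

theorem pvBitsB_fuel (f : Nat) : ∀ num : Int, 0 ≤ num → num.toNat < f →
    pvBitsB f num = pvBitsBW num := by
  induction f with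
  | zero => intro num h hf; omega
  | succ f ih =>
    intro num h hf
    by_cases hz : num = 0
    · rw [pvBitsB, if_pos hz, hz, pvBitsBW_zero]
    · rw [pvBitsB, if_neg hz, pvBand1, pvShiftr1, ih (num / 2) (by omega) (by omega),
        pvBitsBW_pos num (by omega)]

-- the per-run emission A performs, abbreviated for the main induction
def pvEmit (j i : Int) : List Int := if j = 1 then [i] else [j - i - 1, i + 1]

theorem pvMain (n : Nat) : ∀ num : Int, 0 ≤ num → num.toNat = n →
    (∀ i pos, pvOuterAW num i pos = pos ++ pvEnc (pvRuns (pvBitsBW num) i none)) ∧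
    (∀ i j pos, 1 ≤ j →
      pvOuterAW (pvTakeOnesW num i j).1 (pvTakeOnesW num i j).2.1
          (pos ++ pvEmit (pvTakeOnesW num i j).2.2 (pvTakeOnesW num i j).2.1)
        = pos ++ pvEnc (pvRuns (pvBitsBW num) i (some (i - j)))) := by
  induction n using Nat.strong_induction_on with
  | _ n ih =>
    intro num h0 hn
    by_cases hz : num = 0
    · subst hz
      constructor
      · intro i pos
        rw [pvOuterAW_stop _ _ _ (by omega), pvBitsBW_zero]
        simp [pvRuns, pvEnc]
      · intro i j pos hj
        rw [pvTakeOnesW_even 0 i j (by decide), pvBitsBW_zero]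
        rw [pvOuterAW_stop _ _ _ (by omega)]
        simp only [pvRuns, pvEnc, pvEmit, List.flatMap]
        have h1 : i - (i - j) = j := by omega
        rw [h1]
        by_cases hj1 : j = 1
        · simp [hj1]
        · simp [hj1]
    · have hpos : 0 < num := by omega
      have hhalf : 0 ≤ num / 2 ∧ num / 2 < num := by omega
      have ihh := ih (num / 2).toNat (by omega) (num / 2) hhalf.1 rfl
      by_cases hpar : num % 2 = 0
      -- even
      · have hpos2 : 0 < num / 2 := by omega
        have H1 : ∀ i pos, pvOuterAW num i pos = pos ++ pvEnc (pvRuns (pvBitsBW num) i none) := by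
          intro i pos
          rw [pvOuterAW_pos _ _ _ hpos, pvSkipZerosW_even num i hz hpar,
            ← pvOuterAW_pos _ _ _ hpos2, ihh.1 (i + 1) pos, pvBitsBW_pos num hpos, hpar]
          simp [pvRuns]
        refine ⟨H1, ?_⟩
        intro i j pos hj
        rw [pvTakeOnesW_even num i j hpar]
        simp only
        rw [H1 i (pos ++ pvEmit j i)]
        rw [pvBitsBW_pos num hpos, hpar]
        simp only [pvRuns]
        have h1 : i - (i - j) = j := by omega
        rw [h1]
        simp only [pvEnc, pvEmit]
        by_cases hj1 : j = 1
        · simp [hj1]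
        · simp [hj1]
      -- odd
      · have hpar1 : num % 2 = 1 := by omega
        have H2 : ∀ i j pos, 1 ≤ j →
            pvOuterAW (pvTakeOnesW num i j).1 (pvTakeOnesW num i j).2.1
                (pos ++ pvEmit (pvTakeOnesW num i j).2.2 (pvTakeOnesW num i j).2.1)
              = pos ++ pvEnc (pvRuns (pvBitsBW num) i (some (i - j))) := by
          intro i j pos hj
          rw [pvTakeOnesW_odd num i j hpar1 (by omega)]
          have := ihh.2 (i + 1) (j + 1) pos (by omega)
          have hst : (i + 1) - (j + 1) = i - j := by omega
          rw [hst] at this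
          rw [this, pvBitsBW_pos num hpos, hpar1]
          simp [pvRuns]
        refine ⟨?_, H2⟩
        intro i pos
        have hemit : ∀ t : Int × Int × Int, (if t.2.2 = 1 then pos ++ [t.2.1]
            else pos ++ [t.2.2 - t.2.1 - 1, t.2.1 + 1]) = pos ++ pvEmit t.2.2 t.2.1 := by
          intro t; unfold pvEmit; split <;> rfl
        rw [pvOuterAW_pos _ _ _ hpos, pvSkipZerosW_odd num i hpar1]
        rw [hemit]
        have := ihh.2 (i + 1) (0 + 1) pos (by omega)
        have hst : (i + 1) - (0 + 1) = i := by omega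
        rw [hst] at this
        rw [pvTakeOnesW_odd num i 0 hpar1 (by omega), this, pvBitsBW_pos num hpos, hpar1]
        simp [pvRuns]

-- ===== VERDICT (by name: the statement is the Claim_ definition above) =====
theorem get_consec_ones_spec : Claim_equal_get_consec_ones := by
  intro num _ hpre
  unfold Spec_get_consec_ones get_consec_ones get_consec_ones_alt
  rw [pvOuterA_fuel (num.toNat + 1) num 0 [] hpre (by omega),
    pvBitsB_fuel (num.toNat + 1) num hpre (by omega)]
  have := (pvMain num.toNat num hpre rfl).1 0 []
  simpa using this
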